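-- pv_equiv track=rewrite | github.com/Axren-source/MatchMatrix-AI | football_api.py | find_team_by_name
-- ===== SOURCE A (Python) =====
-- def normalize_name(name: str) -> str:
--     return " ".join(name.lower().strip().split())
--
-- def find_team_by_name(team_name: str, teams):
--     target = normalize_name(team_name)
--
--     exact_match = None
--     partial_matches = []
--
--     for team in teams:
--         possible_names = [
--             team.get("name", ""),
--             team.get("shortName", ""),
--             team.get("tla", "")
--         ]
--
--         lowered = [normalize_name(name) for name in possible_names if name]
--
--         if target in lowered:
--             exact_match = team
--             break
--
--         if any(target in name for name in lowered):
--             partial_matches.append(team)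
--
--     if exact_match:
--         return exact_match
--
--     if partial_matches:
--         return partial_matches[0]
--
--     return None
-- ===== SOURCE B (Python) =====
-- def normalize_name(name: str) -> str:
--     return " ".join(name.lower().strip().split())
--
--
-- def _candidate_names(team):
--     return [normalize_name(n)
--             for n in (team.get("name", ""), team.get("shortName", ""), team.get("tla", ""))
--             if n]
--
--
-- def find_team_by_name(team_name: str, teams):
--     target = normalize_name(team_name)
--     for team in teams:
--         if target in _candidate_names(team):
--             return team
--     for team in teams:
--         if any(target in name for name in _candidate_names(team)):
--             return team
--     return None
-- ===== Notes on version B (the rewrite author's own statement) =====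
-- stated objective: simpler
-- what changed: Replaced the single loop that maintains an exact_match sentinel plus a partial_matches accumulator list (with break and post-loop truthiness checks) by two plain passes that each return the first hit directly: an exact-name pass, then a substring pass; no accumulator state at all.
import Mathlib
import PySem

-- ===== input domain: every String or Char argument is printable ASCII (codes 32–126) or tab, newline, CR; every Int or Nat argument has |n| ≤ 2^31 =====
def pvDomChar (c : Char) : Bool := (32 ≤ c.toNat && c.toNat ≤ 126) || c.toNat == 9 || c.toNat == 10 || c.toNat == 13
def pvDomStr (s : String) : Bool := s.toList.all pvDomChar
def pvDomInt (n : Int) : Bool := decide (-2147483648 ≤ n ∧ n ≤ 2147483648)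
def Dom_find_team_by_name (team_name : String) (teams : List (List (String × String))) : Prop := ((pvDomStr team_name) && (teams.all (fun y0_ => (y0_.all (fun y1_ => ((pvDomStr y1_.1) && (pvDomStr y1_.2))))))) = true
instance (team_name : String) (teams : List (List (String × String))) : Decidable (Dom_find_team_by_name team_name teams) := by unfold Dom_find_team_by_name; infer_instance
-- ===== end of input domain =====

-- B replaces A's single loop with sentinel + partial-accumulator state by two plain first-hit passes (exact, then substring): simpler, same O(n) cost.


-- ===== PORT A =====
-- " ".join(name.lower().strip().split())
def normalize_name (name : String) : String :=
  PySem.Str.join " " (PySem.Str.split₀ (PySem.Str.strip (PySem.Str.lower name)))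

-- A's single loop: carries (exact_match, partial_matches); the first 'if' is the break.
def findLoopA (target : String) (teams : List (List (String × String)))
    (partials : List (List (String × String))) :
    Option (List (String × String)) × List (List (String × String)) :=
  match teams with
  | [] => (none, partials)
  | team :: rest =>
    let possible_names := [(PySem.Dict.mk team).getD "name" "",
                           (PySem.Dict.mk team).getD "shortName" "",
                           (PySem.Dict.mk team).getD "tla" ""]
    let lowered := (possible_names.filter (fun n => n ≠ "")).map normalize_name
    if lowered.contains target then (some team, partials)
    else if lowered.any (fun n => PySem.Str.isIn target n) then
      findLoopA target rest (partials ++ [team])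
    else
      findLoopA target rest partials

-- A's post-loop code: 'if exact_match: …; if partial_matches: …; return None' (dict truthiness kept).
def finishA (res : Option (List (String × String)) × List (List (String × String))) :
    Option (List (String × String)) :=
  match res.1 with
  | some t => if t.isEmpty then (match res.2 with | [] => none | p :: _ => some p) else some t
  | none => match res.2 with | [] => none | p :: _ => some p

def find_team_by_name (team_name : String) (teams : List (List (String × String))) :
    Option (List (String × String)) :=
  let target := normalize_name team_name
  finishA (findLoopA target teams [])

-- ===== PORT B =====
-- [normalize_name(n) for n in (team.get("name",""), team.get("shortName",""), team.get("tla","")) if n]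
def candidate_names (team : List (String × String)) : List String :=
  ([(PySem.Dict.mk team).getD "name" "",
    (PySem.Dict.mk team).getD "shortName" "",
    (PySem.Dict.mk team).getD "tla" ""].filter (fun n => n ≠ "")).map normalize_name

def find_team_by_name_alt (team_name : String) (teams : List (List (String × String))) :
    Option (List (String × String)) :=
  let target := normalize_name team_name
  match teams.find? (fun team => (candidate_names team).contains target) with
  | some t => some t
  | none => teams.find? (fun team => (candidate_names team).any (fun n => PySem.Str.isIn target n))

-- ===== PRECONDITION & SPEC =====
def Spec_find_team_by_name (team_name : String) (teams : List (List (String × String))) (out : Option (List (String × String))) : Prop := out = find_team_by_name_alt team_name teams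
instance (team_name : String) (teams : List (List (String × String))) (out : Option (List (String × String))) : Decidable (Spec_find_team_by_name team_name teams out) := by unfold Spec_find_team_by_name; infer_instance

-- ===== CLAIM (what is proved, stated in full; the proofs are below) =====
def Claim_equal_find_team_by_name : Prop := ∀ (team_name : String) (teams : List (List (String × String))), Dom_find_team_by_name team_name teams → Spec_find_team_by_name team_name teams (find_team_by_name team_name teams)

-- ===== LEMMAS AND PROOFS =====

-- an empty dict has no candidate names, so an exact match is a non-empty dict
theorem candidate_names_nil : candidate_names [] = [] := by decide

theorem loopA_spec (target : String) (teams : List (List (String × String)))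
    (partials : List (List (String × String))) :
    finishA (findLoopA target teams partials)
      = match teams.find? (fun team => (candidate_names team).contains target) with
        | some t => some t
        | none => (partials ++ teams.filter
            (fun team => (candidate_names team).any (fun n => PySem.Str.isIn target n))).head? := by
  induction teams generalizing partials with
  | nil =>
    simp [findLoopA, finishA]
    cases partials <;> simp
  | cons team rest ih =>
    by_cases hc : (candidate_names team).contains target = true
    · have hne : team.isEmpty = false := by
        cases team with
        | nil => exact absurd hc (by rw [candidate_names_nil]; simp)
        | cons _ _ => rfl
      have hloop : findLoopA target (team :: rest) partials = (some team, partials) := by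
        simp only [findLoopA]
        rw [show ([(PySem.Dict.mk team).getD "name" "",
             (PySem.Dict.mk team).getD "shortName" "",
             (PySem.Dict.mk team).getD "tla" ""].filter (fun n => n ≠ "")).map normalize_name
             = candidate_names team from rfl, if_pos hc]
      rw [hloop, List.find?_cons_of_pos (p := fun team => (candidate_names team).contains target) hc]
      simp [finishA, hne]
    · have hu : findLoopA target (team :: rest) partials
          = if (candidate_names team).any (fun n => PySem.Str.isIn target n) then
              findLoopA target rest (partials ++ [team])
            else findLoopA target rest partials := by
        simp only [findLoopA]
        rw [show ([(PySem.Dict.mk team).getD "name" "",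
             (PySem.Dict.mk team).getD "shortName" "",
             (PySem.Dict.mk team).getD "tla" ""].filter (fun n => n ≠ "")).map normalize_name
             = candidate_names team from rfl, if_neg hc]
      rw [List.find?_cons_of_neg (p := fun team => (candidate_names team).contains target) hc]
      by_cases hp : ((candidate_names team).any (fun n => PySem.Str.isIn target n)) = true
      · rw [hu, if_pos hp, ih, List.filter_cons_of_pos (p := fun team => (candidate_names team).any (fun n => PySem.Str.isIn target n)) hp]
        cases List.find? (fun team => (candidate_names team).contains target) rest <;> simp
      · rw [hu, if_neg hp, ih, List.filter_cons_of_neg (p := fun team => (candidate_names team).any (fun n => PySem.Str.isIn target n)) hp]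

-- ===== VERDICT (by name: the statement is the Claim_ definition above) =====
theorem find_team_by_name_spec : Claim_equal_find_team_by_name := by
  intro team_name teams _
  unfold Spec_find_team_by_name
  simp only [find_team_by_name, find_team_by_name_alt]
  rw [loopA_spec]
  cases h : teams.find? (fun team => (candidate_names team).contains (normalize_name team_name)) with
  | some t => rfl
  | none => rw [List.nil_append, List.head?_filter]
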